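-- pv_equiv track=rewrite | github.com/n1c0p/AdventOfCode | 2025/python/src/day_3.py | max_shock
-- ===== SOURCE A (Python) =====
-- def max_shock(line:list[int]) -> int:
--     """
--     Calcola il massimo 'shock' in una riga di cifre.
--     Per ogni posizione i prende la cifra in posizione i come decina
--     e la cifra massima alla sua destra come unità, formando first*10+second.
--     Restituisce il massimo di questi valori.
--     """
--     best = 0
--     # scorri tutte le posizioni per la prima cifra (decina)
--     for i in range(len(line) - 1):
--         first = int(line[i])
--         # trova il valore massimo alla destra di i
--         second = max(int(c) for c in line[i + 1:])
--         # forma il numero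
--         shock = first * 10 + second
--         # aggiorna se è migliore
--         if shock > best:
--             best = shock
--     return best
-- ===== SOURCE B (Python) =====
-- def max_shock(line: list[int]) -> int:
--     # One right-to-left pass keeping the running maximum of the suffix.
--     best = 0
--     suf = None
--     for x in reversed(line):
--         if suf is not None:
--             best = max(best, x * 10 + suf)
--             suf = max(suf, x)
--         else:
--             suf = x
--     return best
-- ===== Notes on version B (the rewrite author's own statement) =====
-- stated objective: faster
-- what changed: Replaces the per-position rescan of the right suffix (max(line[i+1:]) inside the loop) by a single right-to-left pass that maintains the running suffix maximum.
import Mathlib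
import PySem

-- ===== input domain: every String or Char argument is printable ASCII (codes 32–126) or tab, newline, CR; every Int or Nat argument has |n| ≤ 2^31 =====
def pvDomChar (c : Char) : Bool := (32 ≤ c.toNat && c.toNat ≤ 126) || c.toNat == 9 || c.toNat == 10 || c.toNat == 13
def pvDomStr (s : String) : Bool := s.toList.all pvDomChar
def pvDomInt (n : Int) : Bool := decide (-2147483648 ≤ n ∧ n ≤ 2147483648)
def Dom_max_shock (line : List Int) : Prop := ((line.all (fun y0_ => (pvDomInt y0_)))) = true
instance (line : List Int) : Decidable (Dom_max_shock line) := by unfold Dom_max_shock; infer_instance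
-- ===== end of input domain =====

-- B replaces A's per-position rescan of the right suffix by one right-to-left pass
-- keeping the running suffix maximum (objective: faster, O(n) vs O(n^2)).


-- ===== PORT A =====
-- A's loop body; max(generator) raises only on an empty suffix, which i < len-1
-- rules out, so the .getD 0 default is never taken.
def aStep (line : List Int) (best i : Int) : Int :=
  let first := PySem.List.pyGetD line i 0
  let second := (PySem.List.max? (PySem.List.slice line (some (i + 1)) none) (fun y => y)).getD 0
  let shock := first * 10 + second
  if shock > best then shock else best

def max_shock (line : List Int) : Int :=
  (PySem.List.pyRange 0 (PySem.List.len line - 1) 1).foldl (aStep line) 0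

-- ===== PORT B =====
-- loop body of Source B: state = (best, suf)
def bStep (st : Int × Option Int) (x : Int) : Int × Option Int :=
  match st.2 with
  | some s => (max st.1 (x * 10 + s), some (max s x))
  | none => (st.1, some x)

def max_shock_alt (line : List Int) : Int :=
  (line.reverse.foldl bStep (0, none)).1

-- ===== PRECONDITION & SPEC =====
def Spec_max_shock (line : List Int) (out : Int) : Prop := out = max_shock_alt line
instance (line : List Int) (out : Int) : Decidable (Spec_max_shock line out) := by unfold Spec_max_shock; infer_instance

-- ===== CLAIM (what is proved, stated in full; the proofs are below) =====
def Claim_equal_max_shock : Prop := ∀ (line : List Int), Dom_max_shock line → Spec_max_shock line (max_shock line)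

-- ===== LEMMAS AND PROOFS =====

-- the shock value A forms at position i
def shockf (line : List Int) (i : Int) : Int :=
  PySem.List.pyGetD line i 0 * 10
    + (PySem.List.max? (PySem.List.slice line (some (i + 1)) none) (fun y => y)).getD 0

lemma aStep_eq_max (line : List Int) (b i : Int) :
    aStep line b i = max b (shockf line i) := by
  simp only [aStep, shockf]
  rw [max_def]; split_ifs <;> omega

lemma shockf_succ (x r : Int) (rs : List Int) (k : Nat) :
    shockf (x :: r :: rs) ((0 : Int) + (k.succ : Nat)) = shockf (r :: rs) ((0 : Int) + (k : Nat)) := by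
  simp only [shockf]
  have e1 : ((0:Int) + (k.succ : Nat)) = ((k + 1 : Nat) : Int) := by push_cast; ring
  have e2 : ((0:Int) + (k : Nat)) = ((k : Nat) : Int) := by ring
  have e3 : ((k + 1 : Nat) : Int) + 1 = ((k + 2 : Nat) : Int) := by push_cast; ring
  have e4 : ((k : Nat) : Int) + 1 = ((k + 1 : Nat) : Int) := by push_cast; ring
  rw [e1, e2, e3, e4, PySem.List.pyGetD_natCast, PySem.List.pyGetD_natCast,
    PySem.List.slice_from_natCast, PySem.List.slice_from_natCast]
  rfl

lemma shockf_zero (x r : Int) (rs : List Int) :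
    shockf (x :: r :: rs) ((0 : Int) + ((0 : Nat) : Int)) = x * 10 + rs.foldl max r := by
  simp only [shockf]
  norm_num [PySem.List.slice_from_one, PySem.List.max?_id_cons]

-- pull a term maxed into the initial accumulator out of a running-max fold
lemma foldl_max_extract {α : Type} (f : α → Int) (l : List α) (c : Int) :
    ∀ a : Int, l.foldl (fun b k => max b (f k)) (max c a) = max c (l.foldl (fun b k => max b (f k)) a) := by
  induction l with
  | nil => intro a; rfl
  | cons x t ih =>
      intro a
      simp only [List.foldl_cons, max_assoc]
      exact ih (max a (f x))

lemma foldl_max_swap (l : List Int) (a b : Int) :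
    max (l.foldl max a) b = l.foldl max (max b a) := by
  induction l generalizing a b with
  | nil => simp [max_comm]
  | cons x t ih =>
      simp only [List.foldl_cons]
      rw [ih, max_assoc]

lemma max_shock_range (line : List Int) :
    max_shock line
      = (List.range (line.length - 1)).foldl (fun b k => max b (shockf line ((0:Int) + (k : Nat)))) 0 := by
  rw [max_shock]
  have h : PySem.List.len line - 1 = ((line.length - 1 : Nat) : Int) ∨ line = [] := by
    cases line with
    | nil => right; rfl
    | cons y ys => left; simp only [PySem.List.len_eq, List.length_cons, Nat.add_sub_cancel]; push_cast; ring
  rcases h with h | h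
  · rw [h, PySem.List.pyRange_one]
    simp only [Int.sub_zero, Int.toNat_natCast, List.foldl_map]
    have hfun : (fun (b : Int) (k : Nat) => aStep line b ((0:Int) + (k : Nat)))
        = (fun (b : Int) (k : Nat) => max b (shockf line ((0:Int) + (k : Nat)))) := by
      funext b k; exact aStep_eq_max _ _ _
    rw [hfun]
  · subst h; rfl

lemma max_shock_nil : max_shock ([] : List Int) = 0 := by decide

lemma max_shock_single (x : Int) : max_shock [x] = 0 := by
  rw [max_shock_range]; rfl

-- A's quadratic loop unfolds structurally: head shock maxed with A on the tail
lemma max_shock_cons (x r : Int) (rs : List Int) :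
    max_shock (x :: r :: rs) = max (x * 10 + rs.foldl max r) (max_shock (r :: rs)) := by
  rw [max_shock_range, max_shock_range]
  have hl1 : (x :: r :: rs).length - 1 = rs.length + 1 := by simp
  have hl2 : (r :: rs).length - 1 = rs.length := by simp
  rw [hl1, hl2, List.range_succ_eq_map]
  simp only [List.foldl_cons, List.foldl_map]
  have hfun : (fun (b : Int) (k : Nat) => max b (shockf (x :: r :: rs) ((0:Int) + (k.succ : Nat))))
      = (fun (b : Int) (k : Nat) => max b (shockf (r :: rs) ((0:Int) + (k : Nat)))) := by
    funext b k; rw [shockf_succ]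
  rw [hfun, shockf_zero, max_comm 0, foldl_max_extract]

lemma bStep_some (b s x : Int) : bStep (b, some s) x = (max b (x * 10 + s), some (max s x)) := rfl

lemma foldr_snd (x : Int) (t : List Int) :
    (List.foldr (fun y st => bStep st y) ((0 : Int), (none : Option Int)) (x :: t)).2
      = some (t.foldl max x) := by
  induction t generalizing x with
  | nil => rfl
  | cons r rs ih =>
      have h := ih r
      simp only [List.foldr_cons] at h ⊢
      rcases hF : bStep (List.foldr (fun y st => bStep st y) ((0:Int), (none : Option Int)) rs) r
        with ⟨b2, s2⟩
      rw [hF] at h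
      simp only at h
      rw [h, bStep_some]
      simp only [List.foldl_cons]
      rw [foldl_max_swap]

lemma foldr_fst (line : List Int) :
    (List.foldr (fun y st => bStep st y) ((0 : Int), (none : Option Int)) line).1
      = max_shock line := by
  induction line with
  | nil => simp [max_shock_nil]
  | cons x t ih =>
      cases t with
      | nil => simp [bStep, max_shock_single]
      | cons r rs =>
          have h2 := foldr_snd r rs
          simp only [List.foldr_cons] at ih h2 ⊢
          rcases hF : bStep (List.foldr (fun y st => bStep st y) ((0:Int), (none : Option Int)) rs) r
            with ⟨b2, s2⟩
          rw [hF] at ih h2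
          simp only at ih h2
          rw [h2, bStep_some]
          simp only [ih]
          rw [max_shock_cons, max_comm]

-- ===== VERDICT (by name: the statement is the Claim_ definition above) =====
theorem max_shock_spec : Claim_equal_max_shock := by
  intro line _
  unfold Spec_max_shock
  rw [max_shock_alt, List.foldl_reverse, foldr_fst]
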